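-- pv_equiv track=rewrite | github.com/Cerebras/modelzoo | src/cerebras/modelzoo/data/common/input_utils.py | shard_list_interleaved
-- ===== SOURCE A (Python) =====
-- def shard_list_interleaved(input_list, worker_id, num_workers):
--     """
--     Shards a list by assigning consecutive elements to alternating workers
--     (i.e. interleaving). If the length of the list is not divisible by the
--     number of workers, the remainder elements are spread across a subset
--     of the workers such that each worker in the subset receives 1 extra
--     element.
--
--     Args:
--         input_list (list): list to shard in an interleaved fashion
--         worker_id (int): index of shard to return
--         num_workers (int): number of shards to create
--
--     Returns:
--         `worker_id`'s shard (a subset of `input_list`).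
--     """
--
--     output_for_cur_worker = []
--
--     if num_workers != 0:
--         assert num_workers <= len(input_list), (
--             f"Number of processes should be less than number of files, "
--             f"Got `num_workers` equal to {num_workers} and `num_files` equal to {len(input_list)}."
--         )
--
--         # Gather files for the input worker based in the file index and
--         # number of workers.
--         for index, elm in enumerate(input_list):
--             if index % num_workers == worker_id:
--                 output_for_cur_worker.append(elm)
--     else:
--         output_for_cur_worker = input_list
--
--     return output_for_cur_worker
-- ===== SOURCE B (Python) =====
-- def shard_list_interleaved(input_list, worker_id, num_workers):
--     """Interleaved sharding via stride slicing instead of a per-element modulo filter."""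
--     if num_workers == 0:
--         return input_list
--     assert num_workers <= len(input_list), (
--         f"Number of processes should be less than number of files, "
--         f"Got `num_workers` equal to {num_workers} and `num_files` equal to {len(input_list)}."
--     )
--     if 0 <= worker_id < num_workers:
--         return input_list[worker_id::num_workers]
--     return []
-- ===== Notes on version B (the rewrite author's own statement) =====
-- stated objective: faster
-- what changed: Replaces the enumerate-and-filter loop (testing index % num_workers == worker_id on every element) with a single guarded stride slice input_list[worker_id::num_workers].
-- outside the precondition, e.g. on shard_list_interleaved([1, 2, 3], 0, -1): A returns [1, 2, 3], B returns []
import Mathlib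
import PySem

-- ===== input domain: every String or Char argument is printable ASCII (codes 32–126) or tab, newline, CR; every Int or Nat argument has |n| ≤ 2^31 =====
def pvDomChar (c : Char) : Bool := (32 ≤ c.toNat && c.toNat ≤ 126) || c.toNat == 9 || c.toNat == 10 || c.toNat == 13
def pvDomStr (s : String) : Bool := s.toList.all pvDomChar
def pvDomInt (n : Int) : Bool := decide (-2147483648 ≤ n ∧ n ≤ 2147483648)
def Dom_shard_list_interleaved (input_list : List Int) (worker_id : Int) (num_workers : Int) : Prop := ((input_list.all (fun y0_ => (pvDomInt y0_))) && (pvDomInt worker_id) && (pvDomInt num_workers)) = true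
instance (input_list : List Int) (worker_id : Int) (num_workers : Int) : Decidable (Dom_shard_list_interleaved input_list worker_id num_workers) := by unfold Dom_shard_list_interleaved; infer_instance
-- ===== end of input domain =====

-- ===== PORT A =====
-- B replaces A's per-element modulo filter with one guarded stride slice (idiomatic; return value only).
def shard_list_interleaved (input_list : List Int) (worker_id : Int) (num_workers : Int) : List Int :=
  if num_workers ≠ 0 then
    -- assert num_workers <= len(input_list): failures are excluded by Pre_
    (PySem.List.enumerate input_list).foldl
      (fun acc p => if PySem.Int.mod p.1 num_workers == worker_id then acc ++ [p.2] else acc) []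
  else input_list

-- ===== PORT B =====
def shard_list_interleaved_alt (input_list : List Int) (worker_id : Int) (num_workers : Int) : List Int :=
  if num_workers = 0 then input_list
  else
    -- assert num_workers <= len(input_list): failures are excluded by Pre_
    if 0 ≤ worker_id ∧ worker_id < num_workers then
      -- input_list[worker_id::num_workers]; step = num_workers ≠ 0 here, so slice? is some — .getD [] only totalizes
      (PySem.List.slice? input_list (some worker_id) none num_workers).getD []
    else []

-- ===== PRECONDITION & SPEC =====
-- Pre_ excludes (a) inputs where the assert raises (0 ≠ num_workers > len(input_list)), and
-- (b) num_workers < worker_id ≤ 0 < -num_workers: a negative worker count, outside the natural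
-- domain, on which A's divisor-sign Python modulo accidentally selects elements (B returns []).
def Pre_shard_list_interleaved (input_list : List Int) (worker_id : Int) (num_workers : Int) : Prop :=
  (num_workers ≠ 0 → num_workers ≤ input_list.length) ∧
    ¬ (num_workers < 0 ∧ num_workers < worker_id ∧ worker_id ≤ 0)
instance (input_list : List Int) (worker_id : Int) (num_workers : Int) : Decidable (Pre_shard_list_interleaved input_list worker_id num_workers) := by unfold Pre_shard_list_interleaved; infer_instance
def pvWitness_shard_list_interleaved : List Int × Int × Int := ([10, 20, 30, 40, 50], 1, 2)

def Spec_shard_list_interleaved (input_list : List Int) (worker_id : Int) (num_workers : Int) (out : List Int) : Prop := out = shard_list_interleaved_alt input_list worker_id num_workers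
instance (input_list : List Int) (worker_id : Int) (num_workers : Int) (out : List Int) : Decidable (Spec_shard_list_interleaved input_list worker_id num_workers out) := by unfold Spec_shard_list_interleaved; infer_instance


-- ===== CLAIM (what is proved, stated in full; the proofs are below) =====
def Claim_equal_shard_list_interleaved : Prop := ∀ (input_list : List Int) (worker_id : Int) (num_workers : Int), Dom_shard_list_interleaved input_list worker_id num_workers → Pre_shard_list_interleaved input_list worker_id num_workers → Spec_shard_list_interleaved input_list worker_id num_workers (shard_list_interleaved input_list worker_id num_workers)

-- ===== LEMMAS AND PROOFS =====

-- number of indices i < n with i % m = w (for 0 < m, w < m): ceil((n - w) / m)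
def pvCnt (n w m : Nat) : Nat := (n + m - 1 - w) / m

lemma pvCnt_iff {n w m k : Nat} (hm : 0 < m) (hw : w < m) :
    k < pvCnt n w m ↔ w + m * k < n := by
  unfold pvCnt
  rw [show (k < (n + m - 1 - w) / m) = (k + 1 ≤ (n + m - 1 - w) / m) from rfl,
      Nat.le_div_iff_mul_le hm]
  have h : (k + 1) * m = m * k + m := by ring
  rw [h]; omega

lemma pvCnt_zero {w m : Nat} (hw : w < m) : pvCnt 0 w m = 0 := by
  unfold pvCnt; exact Nat.div_eq_of_lt (by omega)

lemma pvDvd_iff {n w m : Nat} (hw : w < m) : m ∣ (n + m - w) ↔ n % m = w := by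
  have hn := Nat.mod_lt n (show 0 < m by omega)
  have hsplit : n + m - w = m * (n / m) + (n % m + m - w) := by
    have := Nat.div_add_mod n m; omega
  rw [hsplit, Nat.dvd_add_right (Dvd.intro _ rfl)]
  constructor
  · intro h
    rcases h with ⟨c, hc⟩
    have hc2 : m * c < m * 2 := by omega
    have hcl : c < 2 := Nat.lt_of_mul_lt_mul_left hc2
    have hc0 : c ≠ 0 := by rintro rfl; omega
    have hc1 : c = 1 := by omega
    rw [hc1] at hc; omega
  · intro h; exact ⟨1, by omega⟩

lemma pvCnt_succ {n w m : Nat} (hm : 0 < m) (hw : w < m) :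
    pvCnt (n + 1) w m = if n % m = w then pvCnt n w m + 1 else pvCnt n w m := by
  have h1 : n + 1 + m - 1 - w = (n + m - 1 - w) + 1 := by omega
  unfold pvCnt
  rw [h1, Nat.succ_div]
  have h2 : (n + m - 1 - w) + 1 = n + m - w := by omega
  rw [h2]
  by_cases hd : n % m = w
  · simp [(pvDvd_iff hw).2 hd, hd]
  · have : ¬ m ∣ (n + m - w) := fun h => hd ((pvDvd_iff hw).1 h)
    simp [this, hd]

lemma pvCnt_val {n w m : Nat} (hm : 0 < m) (hw : w < m) (hd : n % m = w) :
    w + m * pvCnt n w m = n := by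
  set q := n / m with hq
  have hn : n = m * q + w := by
    have h := Nat.div_add_mod n m
    rw [← hq] at h; omega
  have hc : pvCnt n w m = q := by
    unfold pvCnt
    have h1 : n + m - 1 - w = m * q + (m - 1) := by omega
    rw [h1, Nat.mul_add_div hm, Nat.div_eq_of_lt (by omega)]
    omega
  rw [hc]; omega

-- A's loop on the nonzero branch selects exactly the elements at indices w, w+m, w+2m, …
lemma pvA_filter (w m : Nat) (hm : 0 < m) (hw : w < m) (xs : List Int) :
    ((PySem.List.enumerate xs).filter
        (fun p => PySem.Int.mod p.1 (m : Int) == (w : Int))).map Prod.snd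
      = (List.range (pvCnt xs.length w m)).map (fun k => xs.getD (w + m * k) 0) := by
  induction xs using List.reverseRecOn with
  | nil => simp [PySem.List.enumerate, pvCnt_zero hw]
  | append_singleton ys x ih =>
    rw [PySem.List.enumerate_append, List.filter_append, List.map_append]
    have hlen : (ys ++ [x]).length = ys.length + 1 := by simp
    rw [hlen, pvCnt_succ hm hw]
    have hmod : (PySem.Int.mod ((0 : Int) + (ys.length : Int)) (m : Int) == ((w : Int)))
        = decide (ys.length % m = w) := by
      rw [show ((0 : Int) + (ys.length : Int)) = ((ys.length : Nat) : Int) by ring,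
          PySem.Int.mod_natCast]
      by_cases h : ys.length % m = w
      · simp [h]
      · simp only [decide_eq_false h, beq_eq_false_iff_ne, ne_eq, Int.natCast_inj]
        omega
    have hsingle : List.map Prod.snd ((PySem.List.enumerate [x] (0 + (ys.length : Int))).filter
          (fun p => PySem.Int.mod p.1 (m : Int) == (w : Int)))
        = if ys.length % m = w then [x] else [] := by
      rw [PySem.List.enumerate_cons, PySem.List.enumerate_nil, List.filter_cons]
      simp only [hmod]
      by_cases h : ys.length % m = w <;> simp [h]
    have hold : (List.range (pvCnt ys.length w m)).map (fun k => (ys ++ [x]).getD (w + m * k) 0)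
        = (List.range (pvCnt ys.length w m)).map (fun k => ys.getD (w + m * k) 0) := by
      apply List.map_congr_left
      intro k hk
      exact List.getD_append _ _ _ _ ((pvCnt_iff hm hw).1 (List.mem_range.1 hk))
    by_cases h : ys.length % m = w
    · rw [if_pos h, List.range_succ, List.map_append, hold, ih, hsingle, if_pos h]
      have hidx : w + m * pvCnt ys.length w m = ys.length := pvCnt_val hm hw h
      simp [hidx, List.getD_append_right]
    · rw [if_neg h, hold, ih, hsingle, if_neg h, List.append_nil]

-- B's slice produces the same stride selection.
lemma pvB_slice (w m : Nat) (hm : 0 < m) (hw : w < m) (xs : List Int) (hn : m ≤ xs.length) :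
    (PySem.List.slice? xs (some (w : Int)) none (m : Int)).getD []
      = (List.range (pvCnt xs.length w m)).map (fun k => xs.getD (w + m * k) 0) := by
  have hm' : ((m : Int) ≠ 0) := by exact_mod_cast hm.ne'
  have hwn : w < xs.length := lt_of_lt_of_le hw hn
  unfold PySem.List.slice? PySem.List.sliceIndices
  simp only [hm', if_false]
  have hstepneg : ¬ ((m : Int) < 0) := by omega
  have hwneg : ¬ ((w : Int) < 0) := by omega
  simp only [hstepneg, if_false, hwneg]
  have hstart : min (w : Int) (xs.length : Int) = (w : Int) := by
    apply min_eq_left; exact_mod_cast hwn.le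
  rw [hstart]
  have hpos : (0 : Int) < (m : Int) := by exact_mod_cast hm
  have hlt : (w : Int) < (xs.length : Int) := by exact_mod_cast hwn
  simp only [hpos, if_pos, hlt]
  have hcount : (((xs.length : Int) - (w : Int) + (m : Int) - 1) / (m : Int)).toNat
      = pvCnt xs.length w m := by
    have h1 : ((xs.length : Int) - (w : Int) + (m : Int) - 1)
        = ((xs.length + m - 1 - w : Nat) : Int) := by omega
    rw [h1, ← Int.natCast_div, Int.toNat_natCast]; rfl
  rw [hcount, Option.getD_some]
  have hpt : ∀ k ∈ List.range (pvCnt xs.length w m),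
      xs[((w : Int) + (m : Int) * (k : Int)).toNat]?
        = (some ∘ fun k => xs.getD (w + m * k) 0) k := by
    intro k hk
    have hk' : w + m * k < xs.length := (pvCnt_iff hm hw).1 (List.mem_range.1 hk)
    have hidx : ((w : Int) + (m : Int) * (k : Int)).toNat = w + m * k := by
      omega
    simp only [Function.comp_apply, hidx, List.getElem?_eq_getElem hk',
      List.getD_eq_getElem _ _ hk']
  rw [List.filterMap_congr hpt, List.filterMap_eq_map]

-- when worker_id can never equal an index modulo num_workers, A's filter keeps nothing
lemma pvA_empty (xs : List Int) (wid nw : Int)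
    (hout : ∀ i : Int, PySem.Int.mod i nw ≠ wid) :
    (PySem.List.enumerate xs).foldl
      (fun acc p => if PySem.Int.mod p.1 nw == wid then acc ++ [p.2] else acc) [] = [] := by
  rw [PySem.List.foldl_append_if]
  have : (PySem.List.enumerate xs).filter (fun p => PySem.Int.mod p.1 nw == wid) = [] := by
    rw [List.filter_eq_nil_iff]
    intro p hp
    simp only [beq_iff_eq]
    exact hout p.1
  rw [this]; rfl

-- ===== VERDICT (by name: the statement is the Claim_ definition above) =====
theorem shard_list_interleaved_spec : Claim_equal_shard_list_interleaved := by
  intro xs wid nw _ hpre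
  obtain ⟨hlen, hneg⟩ := hpre
  unfold Spec_shard_list_interleaved shard_list_interleaved shard_list_interleaved_alt
  by_cases h0 : nw = 0
  · simp [h0]
  · rw [if_pos h0, if_neg h0]
    by_cases hrange : 0 ≤ wid ∧ wid < nw
    · rw [if_pos hrange]
      obtain ⟨hw0, hwlt⟩ := hrange
      have hnn : 0 ≤ nw := le_of_lt (lt_of_le_of_lt hw0 hwlt)
      have hmc : ((nw.toNat : Nat) : Int) = nw := Int.toNat_of_nonneg hnn
      have hwc : ((wid.toNat : Nat) : Int) = wid := Int.toNat_of_nonneg hw0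
      have hmpos : 0 < nw.toNat := by omega
      have hwm : wid.toNat < nw.toNat := by omega
      have hmlen : nw.toNat ≤ xs.length := by have := hlen h0; omega
      rw [← hmc, ← hwc, PySem.List.foldl_append_if, List.nil_append,
          pvA_filter wid.toNat nw.toNat hmpos hwm xs,
          pvB_slice wid.toNat nw.toNat hmpos hwm xs hmlen]
    · rw [if_neg hrange]
      apply pvA_empty
      intro i
      rcases lt_or_gt_of_ne h0 with hneg0 | hpos0
      · have hb := PySem.Int.mod_neg_bounds i hneg0
        intro h; rw [h] at hb; exact hneg ⟨hneg0, hb.1, hb.2⟩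
      · have hb0 := PySem.Int.mod_nonneg i hpos0
        have hb1 := PySem.Int.mod_lt i hpos0
        intro h; rw [h] at hb0 hb1; exact hrange ⟨hb0, hb1⟩
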